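-- pv_equiv track=rewrite | github.com/TheMindVirus/macropad | sketches/USBhttp/code.py | ansify
-- ===== SOURCE A (Python) =====
-- def ansify(data):
--     sz = len(data)
--     newdata = ""
--     for i in range(0, sz):
--         if (i == 0 or i == sz - 1) and data[i] == '\n':
--             pass
--         else:
--             newdata += data[i]
--     return newdata
-- ===== SOURCE B (Python) =====
-- def ansify(data):
--     sz = len(data)
--     start = 1 if sz and data[0] == '\n' else 0
--     end = sz - 1 if sz and data[sz - 1] == '\n' else sz
--     return ''.join(data[start:end])
-- ===== Notes on version B (the rewrite author's own statement) =====
-- stated objective: faster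
-- what changed: Replaced the per-character accumulation loop that skips a newline at either end with a direct computation of the two slice boundaries and a single join over that slice.
import Mathlib
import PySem

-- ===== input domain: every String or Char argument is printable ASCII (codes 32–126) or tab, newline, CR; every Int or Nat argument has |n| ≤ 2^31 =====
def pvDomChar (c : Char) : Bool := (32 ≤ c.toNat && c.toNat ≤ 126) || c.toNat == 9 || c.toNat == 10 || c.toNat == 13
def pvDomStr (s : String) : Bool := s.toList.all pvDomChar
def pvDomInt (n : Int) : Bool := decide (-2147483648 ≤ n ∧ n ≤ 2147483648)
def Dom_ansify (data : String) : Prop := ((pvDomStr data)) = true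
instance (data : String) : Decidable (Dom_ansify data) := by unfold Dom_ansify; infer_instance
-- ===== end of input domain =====

-- B strips a leading/trailing '\n' by computing the slice boundaries directly instead of
-- looping over every character (objective: simpler).

-- ===== PORT A =====
-- per-character loop over range(0, sz), skipping a '\n' at index 0 or sz-1
def ansify (data : String) : String :=
  let cs := data.toList
  let sz : Int := cs.length
  let newdata := (PySem.List.pyRange 0 sz 1).foldl
    (fun acc i =>
      if (i == 0 || i == sz - 1) && (PySem.List.pyGetD cs i ' ' == '\n') then acc
      else acc ++ [PySem.List.pyGetD cs i ' ']) []
  String.ofList newdata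

-- ===== PORT B =====
def ansify_alt (data : String) : String :=
  let cs := data.toList
  let sz : Int := cs.length
  let start : Int := if sz ≠ 0 ∧ PySem.List.pyGetD cs 0 ' ' = '\n' then 1 else 0
  let stop : Int := if sz ≠ 0 ∧ PySem.List.pyGetD cs (sz - 1) ' ' = '\n' then sz - 1 else sz
  String.ofList (PySem.List.slice cs (some start) (some stop))

-- ===== PRECONDITION & SPEC =====
def Spec_ansify (data : String) (out : String) : Prop := out = ansify_alt data
instance (data : String) (out : String) : Decidable (Spec_ansify data out) := by unfold Spec_ansify; infer_instance

-- ===== CLAIM (what is proved, stated in full; the proofs are below) =====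
def Claim_equal_ansify : Prop := ∀ (data : String), Dom_ansify data → Spec_ansify data (ansify data)

-- ===== LEMMAS AND PROOFS =====

theorem ansify_lists_eq (cs : List Char) :
    ((PySem.List.pyRange 0 (cs.length : Int) 1).foldl
      (fun acc i =>
        if (i == 0 || i == (cs.length : Int) - 1) && (PySem.List.pyGetD cs i ' ' == '\n') then acc
        else acc ++ [PySem.List.pyGetD cs i ' ']) []) =
    PySem.List.slice cs
      (some (if (cs.length : Int) ≠ 0 ∧ PySem.List.pyGetD cs 0 ' ' = '\n' then 1 else 0))
      (some (if (cs.length : Int) ≠ 0 ∧ PySem.List.pyGetD cs ((cs.length : Int) - 1) ' ' = '\n'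
             then (cs.length : Int) - 1 else (cs.length : Int))) := by
  cases cs with
  | nil => simp [PySem.List.slice]
  | cons c rest =>
    rcases rest.eq_nil_or_concat with rfl | ⟨ds, b, rfl⟩
    · by_cases hc : c = '\n' <;>
        simp [hc, PySem.List.pyRange, PySem.List.pyGetD, PySem.List.slice, PySem.List.clampIdx]
    · simp only [List.concat_eq_append]
      set n := ds.length with hn
      have hlen : ((c :: (ds ++ [b])).length : Int) = (n : Int) + 2 := by
        simp [hn]; ring
      rw [hlen]
      set cs' : List Char := c :: (ds ++ [b]) with hcs
      -- index facts
      have hget0 : PySem.List.pyGetD cs' 0 ' ' = c := by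
        simp [hcs, PySem.List.pyGetD_zero_cons]
      have hgetlast : PySem.List.pyGetD cs' ((n : Int) + 2 - 1) ' ' = b := by
        have h1 : (n : Int) + 2 - 1 = ((n + 1 : Nat) : Int) := by push_cast; ring
        rw [h1, PySem.List.pyGetD_natCast]
        simp [hcs, List.getD, hn]
      -- LHS: unfold the loop
      have hcons : PySem.List.pyRange 0 ((n : Int) + 2) 1
          = 0 :: PySem.List.pyRange 1 ((n : Int) + 2) 1 :=
        PySem.List.pyRange_one_cons (by omega)
      have hsplit : PySem.List.pyRange 1 ((n : Int) + 2) 1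
          = PySem.List.pyRange 1 ((n : Int) + 1) 1 ++ [(n : Int) + 1] := by
        have := PySem.List.pyRange_one_succ_right (a := 1) (b := (n : Int) + 1) (by omega)
        simpa using this
      have hmid : ∀ acc : List Char,
          (PySem.List.pyRange 1 ((n : Int) + 1) 1).foldl
            (fun acc i =>
              if (i == 0 || i == (n : Int) + 2 - 1) && (PySem.List.pyGetD cs' i ' ' == '\n') then acc
              else acc ++ [PySem.List.pyGetD cs' i ' ']) acc = acc ++ ds := by
        intro acc
        rw [PySem.List.foldl_congr_mem _ _
          (fun acc i => acc ++ [PySem.List.pyGetD cs' i ' ']) _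
          (by
            intro a i hi
            rw [PySem.List.mem_pyRange_one] at hi
            have h0 : (i == (0 : Int)) = false := by simp; omega
            have h1 : (i == (n : Int) + 2 - 1) = false := by simp; omega
            simp [h0, h1])]
        rw [PySem.List.foldl_append_singleton_eq_map]
        congr 1
        apply List.ext_getElem
        · simp [PySem.List.length_pyRange_one]; omega
        · intro k hk1 hk2
          simp only [List.getElem_map, PySem.List.getElem_pyRange_one]
          have h1 : (1 : Int) + k = ((k + 1 : Nat) : Int) := by push_cast; ring
          rw [h1, PySem.List.pyGetD_natCast]
          have hk : k < n := by
            simpa [PySem.List.length_pyRange_one] using hk1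
          simp [hcs, List.getD, List.getElem?_append_left hk, List.getElem?_eq_getElem hk2]
      rw [hcons, List.foldl_cons, hsplit, List.foldl_append, hmid]
      -- slice values on the four boundary choices
      have t2 : ((n : Int) + 2).toNat = n + 2 := by omega
      have t1 : ((n : Int) + 1).toNat = n + 1 := by omega
      have hs00 : PySem.List.slice cs' (some 0) (some ((n : Int) + 2)) = c :: (ds ++ [b]) := by
        rw [PySem.List.slice_toNat _ (by omega) (by omega), t2, hcs]
        simp [hn]
      have hs10 : PySem.List.slice cs' (some 1) (some ((n : Int) + 2)) = ds ++ [b] := by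
        rw [PySem.List.slice_toNat _ (by omega) (by omega), t2, hcs]
        simp [hn]
      have hs01 : PySem.List.slice cs' (some 0) (some ((n : Int) + 1)) = c :: ds := by
        rw [PySem.List.slice_toNat _ (by omega) (by omega), t1, hcs]
        simp [hn]
      have hs11 : PySem.List.slice cs' (some 1) (some ((n : Int) + 1)) = ds := by
        rw [PySem.List.slice_toNat _ (by omega) (by omega), t1, hcs]
        simp [hn]
      have hll : (n : Int) + 2 - 1 = (n : Int) + 1 := by ring
      have hne : ((n : Int) + 2) ≠ 0 := by omega
      rw [hll] at hgetlast ⊢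
      by_cases hcq : c = '\n' <;> by_cases hbq : b = '\n' <;>
        simp [List.foldl_cons, List.foldl_nil, hget0, hgetlast, hcq, hbq, hne,
          hs00, hs10, hs01, hs11]

-- ===== VERDICT (by name: the statement is the Claim_ definition above) =====
theorem ansify_spec : Claim_equal_ansify := by
  intro data _
  unfold Spec_ansify ansify ansify_alt
  simp only []
  exact congrArg String.ofList (ansify_lists_eq data.toList)
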